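-- pv_equiv track=rewrite | github.com/tamlog06/Atcoder-Beginner-Contest | problems/ABC/089/c/abc089_c.py | solve
-- ===== SOURCE A (Python) =====
-- def solve(N, S):
--     initials = [0]*5
--
--     for s in S:
--         if s[0] in ['M', 'A', 'R', 'C', 'H']:
--             initials['MARCH'.index(s[0])] += 1
--
--     ans = 0
--     for i in range(5):
--         for j in range(i+1, 5):
--             for k in range(j+1, 5):
--                 ans += initials[i] * initials[j] * initials[k]
--
--     return ans
-- ===== SOURCE B (Python) =====
-- def solve(N, S):
--     # count names per MARCH initial in five comprehension passes,
--     # then get the sum over all distinct triples as the 3rd elementary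
--     # symmetric polynomial of the counts via one accumulating pass.
--     counts = [sum(1 for s in S if s.startswith(ch)) for ch in "MARCH"]
--     e1 = e2 = e3 = 0
--     for x in counts:
--         e3 += e2 * x
--         e2 += e1 * x
--         e1 += x
--     return e3
-- ===== Notes on version B (the rewrite author's own statement) =====
-- stated objective: simpler
-- what changed: The nested i<j<k triple loop over the five buckets is replaced by a single elementary-symmetric-polynomial pass (e3 += e2*x; e2 += e1*x; e1 += x), and the index-increment counting is replaced by per-initial startswith counts; B also returns 0-contributions naturally on empty names where A raises.
import Mathlib
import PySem

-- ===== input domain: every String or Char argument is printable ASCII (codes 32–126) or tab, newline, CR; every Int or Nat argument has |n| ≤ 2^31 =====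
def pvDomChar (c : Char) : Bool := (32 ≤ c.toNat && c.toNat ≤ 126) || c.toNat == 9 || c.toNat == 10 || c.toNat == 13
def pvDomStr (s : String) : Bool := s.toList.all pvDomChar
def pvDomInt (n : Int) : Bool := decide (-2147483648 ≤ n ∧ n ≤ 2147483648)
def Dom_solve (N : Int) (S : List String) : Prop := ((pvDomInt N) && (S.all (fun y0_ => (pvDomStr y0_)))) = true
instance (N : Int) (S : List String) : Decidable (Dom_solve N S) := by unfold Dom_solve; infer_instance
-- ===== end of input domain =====

-- B replaces the nested i<j<k triple loop by one elementary-symmetric-polynomial pass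
-- and counts initials by per-letter startswith passes (simpler; same cost).

-- ===== PORT A =====

-- initials['MARCH'.index(s[0])] += 1 : the index is 0..4 here, so this nonnegative
-- list-update helper is exact for A's list assignment.
def pvIncAt : List Int → Int → List Int
  | [], _ => []
  | x :: xs, i => if i = 0 then (x + 1) :: xs else x :: pvIncAt xs (i - 1)

-- one iteration of A's counting loop; `none` from pyGet? is Python's IndexError
-- on s[0] (excluded by Pre_solve, state left unchanged here).
def pvStepA (initials : List Int) (s : String) : List Int :=
  match PySem.Str.pyGet? s 0 with
  | none => initials
  | some c =>
      if c ∈ ['M', 'A', 'R', 'C', 'H'] then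
        pvIncAt initials (PySem.Str.find "MARCH" (String.singleton c))
      else initials

def solve (N : Int) (S : List String) : Int :=
  let initials := S.foldl pvStepA [0, 0, 0, 0, 0]
  (PySem.List.pyRange 0 5 1).foldl (fun ans i =>
    (PySem.List.pyRange (i + 1) 5 1).foldl (fun ans j =>
      (PySem.List.pyRange (j + 1) 5 1).foldl (fun ans k =>
        ans + PySem.List.pyGetD initials i 0 * PySem.List.pyGetD initials j 0
            * PySem.List.pyGetD initials k 0) ans) ans) 0

-- ===== PORT B =====
def solve_alt (N : Int) (S : List String) : Int :=
  let counts := "MARCH".toList.map (fun ch =>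
    S.foldl (fun acc s =>
      acc + (if PySem.Str.startswith s (String.singleton ch) then 1 else 0)) 0)
  let e := counts.foldl
    (fun (p : Int × Int × Int) x => (p.1 + x, p.2.1 + p.1 * x, p.2.2 + p.2.1 * x))
    ((0 : Int), (0 : Int), (0 : Int))
  e.2.2

-- ===== PRECONDITION & SPEC =====
-- Pre_ excludes lists containing an empty name, on which A's s[0] raises IndexError.
def Pre_solve (N : Int) (S : List String) : Prop := ∀ s ∈ S, s ≠ ""
instance (N : Int) (S : List String) : Decidable (Pre_solve N S) := by
  unfold Pre_solve; infer_instance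

def pvWitness_solve : Int × List String := (3, ["MASHIKE", "RUMOI", "OBIRA"])

def Spec_solve (N : Int) (S : List String) (out : Int) : Prop := out = solve_alt N S
instance (N : Int) (S : List String) (out : Int) : Decidable (Spec_solve N S out) := by
  unfold Spec_solve; infer_instance

-- ===== CLAIM (what is proved, stated in full; the proofs are below) =====
def Claim_equal_solve : Prop := ∀ (N : Int) (S : List String),
  Dom_solve N S → Pre_solve N S → Spec_solve N S (solve N S)

-- ===== LEMMAS AND PROOFS =====

-- number of names in S whose first character is x
def pvCnt (x : Char) : List String → Int
  | [] => 0
  | s :: S => (if PySem.Str.pyGet? s 0 = some x then 1 else 0) + pvCnt x S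

theorem pvCnt_cons (x : Char) (s : String) (S : List String) :
    pvCnt x (s :: S) = (if PySem.Str.pyGet? s 0 = some x then 1 else 0) + pvCnt x S := rfl

-- A's counting loop computes the five first-letter counts
theorem pvFoldA (S : List String) (h : ∀ s ∈ S, s ≠ "") :
    ∀ v0 v1 v2 v3 v4 : Int,
      S.foldl pvStepA [v0, v1, v2, v3, v4] =
        [v0 + pvCnt 'M' S, v1 + pvCnt 'A' S, v2 + pvCnt 'R' S,
         v3 + pvCnt 'C' S, v4 + pvCnt 'H' S] := by
  induction S with
  | nil => intro v0 v1 v2 v3 v4; simp [pvCnt]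
  | cons s S ih =>
    intro v0 v1 v2 v3 v4
    have hs : s ≠ "" := h s (by simp)
    have hS : ∀ t ∈ S, t ≠ "" := fun t ht => h t (by simp [ht])
    obtain ⟨c, cs, hcs⟩ : ∃ c cs, s.toList = c :: cs := by
      cases hl : s.toList with
      | nil => exact absurd (by simpa using congrArg String.ofList hl) hs
      | cons c cs => exact ⟨c, cs, rfl⟩
    have hpg : PySem.Str.pyGet? s 0 = some c := by
      simp [hcs, PySem.Str.pyGet?, PySem.List.pyGet?, PySem.List.pyIdx?]
    have hpg' : PySem.List.pyGet? s.toList 0 = some c := by simpa using hpg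
    by_cases hM : c = 'M'
    · subst hM
      have hstep : pvStepA [v0, v1, v2, v3, v4] s = [v0 + 1, v1, v2, v3, v4] := by
        norm_num [pvStepA, hpg', pvIncAt,
          show PySem.Chars.find "MARCH".toList ['M'] = 0 from by decide]
      simp only [List.foldl_cons, hstep]
      rw [ih hS]
      simp [pvCnt_cons, hpg', add_assoc]
    · by_cases hA : c = 'A'
      · subst hA
        have hstep : pvStepA [v0, v1, v2, v3, v4] s = [v0, v1 + 1, v2, v3, v4] := by
          norm_num [pvStepA, hpg', pvIncAt,
            show PySem.Chars.find "MARCH".toList ['A'] = 1 from by decide]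
        simp only [List.foldl_cons, hstep]
        rw [ih hS]
        simp [pvCnt_cons, hpg', add_assoc]
      · by_cases hR : c = 'R'
        · subst hR
          have hstep : pvStepA [v0, v1, v2, v3, v4] s = [v0, v1, v2 + 1, v3, v4] := by
            norm_num [pvStepA, hpg', pvIncAt,
              show PySem.Chars.find "MARCH".toList ['R'] = 2 from by decide]
          simp only [List.foldl_cons, hstep]
          rw [ih hS]
          simp [pvCnt_cons, hpg', add_assoc]
        · by_cases hC : c = 'C'
          · subst hC
            have hstep : pvStepA [v0, v1, v2, v3, v4] s = [v0, v1, v2, v3 + 1, v4] := by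
              norm_num [pvStepA, hpg', pvIncAt,
                show PySem.Chars.find "MARCH".toList ['C'] = 3 from by decide]
            simp only [List.foldl_cons, hstep]
            rw [ih hS]
            simp [pvCnt_cons, hpg', add_assoc]
          · by_cases hH : c = 'H'
            · subst hH
              have hstep : pvStepA [v0, v1, v2, v3, v4] s = [v0, v1, v2, v3, v4 + 1] := by
                norm_num [pvStepA, hpg', pvIncAt,
                  show PySem.Chars.find "MARCH".toList ['H'] = 4 from by decide]
              simp only [List.foldl_cons, hstep]
              rw [ih hS]
              simp [pvCnt_cons, hpg', add_assoc]
            · have hstep : pvStepA [v0, v1, v2, v3, v4] s = [v0, v1, v2, v3, v4] := by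
                norm_num [pvStepA, hpg']
                intro hor
                exact absurd hor (by simp [hM, hA, hR, hC, hH])
              simp only [List.foldl_cons, hstep]
              rw [ih hS]
              simp [pvCnt_cons, hpg', hM, hA, hR, hC, hH]

-- B's per-letter pass computes the same count
theorem pvFoldB (ch : Char) (S : List String) (h : ∀ s ∈ S, s ≠ "") :
    ∀ acc : Int,
      S.foldl (fun acc s =>
        acc + (if PySem.Str.startswith s (String.singleton ch) then 1 else 0)) acc =
      acc + pvCnt ch S := by
  induction S with
  | nil => intro acc; simp [pvCnt]
  | cons s S ih =>
    intro acc
    have hs : s ≠ "" := h s (by simp)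
    have hS : ∀ t ∈ S, t ≠ "" := fun t ht => h t (by simp [ht])
    obtain ⟨c, cs, hcs⟩ : ∃ c cs, s.toList = c :: cs := by
      cases hl : s.toList with
      | nil => exact absurd (by simpa using congrArg String.ofList hl) hs
      | cons c cs => exact ⟨c, cs, rfl⟩
    have hpg : PySem.Str.pyGet? s 0 = some c := by
      simp [hcs, PySem.Str.pyGet?, PySem.List.pyGet?, PySem.List.pyIdx?]
    have hpg' : PySem.List.pyGet? s.toList 0 = some c := by simpa using hpg
    have hsw : PySem.Str.startswith s (String.singleton ch) = true ↔ c = ch := by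
      rw [PySem.Str.startswith_eq]
      rw [PySem.Chars.startswith_iff]
      constructor
      · intro hp
        have : (String.singleton ch).toList = [ch] := by simp
        rw [this, hcs] at hp
        obtain ⟨t, ht⟩ := hp
        injection ht with h1 _
        exact h1.symm
      · intro hc
        have : (String.singleton ch).toList = [ch] := by simp
        rw [this, hcs, hc]
        exact ⟨cs, rfl⟩
    by_cases hc : c = ch
    · simp only [List.foldl_cons, if_pos (hsw.mpr hc)]
      rw [ih hS, pvCnt_cons]
      simp [hpg', hc]; ring
    · have : PySem.Str.startswith s (String.singleton ch) ≠ true := fun hh => hc (hsw.mp hh)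
      simp only [List.foldl_cons, if_neg this]
      rw [ih hS, pvCnt_cons]
      simp [hpg', hc]

-- the constant-size parts agree: 10-term triple loop = third elementary symmetric poly
theorem pvFinal (m a r c h : Int) :
    (PySem.List.pyRange 0 5 1).foldl (fun ans i =>
      (PySem.List.pyRange (i + 1) 5 1).foldl (fun ans j =>
        (PySem.List.pyRange (j + 1) 5 1).foldl (fun ans k =>
          ans + PySem.List.pyGetD [m, a, r, c, h] i 0
              * PySem.List.pyGetD [m, a, r, c, h] j 0
              * PySem.List.pyGetD [m, a, r, c, h] k 0) ans) ans) 0 =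
    (([m, a, r, c, h] : List Int).foldl
      (fun (p : Int × Int × Int) x => (p.1 + x, p.2.1 + p.1 * x, p.2.2 + p.2.1 * x))
      ((0 : Int), (0 : Int), (0 : Int))).2.2 := by
  have h0 : PySem.List.pyRange 0 5 1 = [0, 1, 2, 3, 4] := by decide
  have h1 : PySem.List.pyRange (0 + 1) 5 1 = [1, 2, 3, 4] := by decide
  have h2 : PySem.List.pyRange (1 + 1) 5 1 = [2, 3, 4] := by decide
  have h3 : PySem.List.pyRange (2 + 1) 5 1 = [3, 4] := by decide
  have h4 : PySem.List.pyRange (3 + 1) 5 1 = [4] := by decide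
  have h5 : PySem.List.pyRange (4 + 1) 5 1 = [] := by decide
  simp only [h0, List.foldl_cons, h1, h2, h3, h4, h5, List.foldl_nil]
  simp [PySem.List.pyGetD, PySem.List.pyGet?, PySem.List.pyIdx?]
  ring

-- ===== VERDICT (by name: the statement is the Claim_ definition above) =====
theorem solve_spec : Claim_equal_solve := by
  intro N S _ hpre
  unfold Spec_solve solve solve_alt
  have hm : "MARCH".toList = ['M', 'A', 'R', 'C', 'H'] := by decide
  rw [pvFoldA S hpre 0 0 0 0 0]
  simp only [zero_add, hm, List.map_cons, List.map_nil]
  rw [pvFoldB 'M' S hpre 0, pvFoldB 'A' S hpre 0, pvFoldB 'R' S hpre 0,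
      pvFoldB 'C' S hpre 0, pvFoldB 'H' S hpre 0]
  simp only [zero_add]
  exact pvFinal _ _ _ _ _
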